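-- pv_equiv track=rewrite | github.com/jaanos/PSA1 | naloge/2016/dn2/LukaAvbreht/maxindepset.py | list_primernih_otrok
-- ===== SOURCE A (Python) =====
-- def list_primernih_otrok(parent):
--     """Returns the list of all valid children of a parent as a list of binary numbers(strings)"""
--     assert valid_cycle(parent) == True, "Parent is not the valid cycle"
--     if parent[0] == '1':
--         res = ['0']
--         k = 1
--     else:
--         res = ['1','0']
--         k = 2
--     for i in parent[1:]:
--         tren = list()
--         if i =='1':
--             for j in range(k):
--                 tren.append(res[j]+'0')
--         else:
--             dif = 0
--             for j in range(k):
--                 if res[j][-1]=='1':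
--                     tren.append(res[j]+'0')
--                     dif += 1
--                 else:
--                     tren.append(res[j]+'1')
--                     tren.append(res[j]+'0')
--             k = k*2-dif
--         res = tren
--     tren = list()
--     for i in res:
--         if valid_cycle(i):
--             tren.append(i)
--     return tren
--
-- def valid_cycle(cycle):
--     """Returns True if a cycle is valid and False othervise (Cycle is valid ifi it has an independent subgroup of ones)"""
--     for i in range(len(cycle)-1):
--         if cycle[i] == '1':
--             if cycle[i-1] != '0' or cycle[i+1] != '0':
--                 return False
--     return True
-- ===== SOURCE B (Python) =====
-- def valid_cycle(cycle):
--     """Returns True if a cycle is valid and False othervise (Cycle is valid ifi it has an independent subgroup of ones)"""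
--     for i in range(len(cycle)-1):
--         if cycle[i] == '1':
--             if cycle[i-1] != '0' or cycle[i+1] != '0':
--                 return False
--     return True
--
-- def list_primernih_otrok(parent):
--     """Returns the list of all valid children of a parent as a list of binary numbers(strings)"""
--     assert valid_cycle(parent) == True, "Parent is not the valid cycle"
--     out = []
--     # depth-first search over positions, '1' branch explored before '0' branch
--     stack = [(parent, '')]
--     while stack:
--         rest, prefix = stack.pop()
--         if not rest:
--             out.append(prefix)
--         elif rest[0] == '1' or (prefix and prefix[-1] == '1'):
--             stack.append((rest[1:], prefix + '0'))
--         else: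
--             stack.append((rest[1:], prefix + '0'))
--             stack.append((rest[1:], prefix + '1'))
--     return [s for s in out if valid_cycle(s)]
-- ===== Notes on version B (the rewrite author's own statement) =====
-- stated objective: alternative
-- what changed: Replaces A's level-by-level list rebuilding with explicit k/dif length bookkeeping by a recursive backtracking DFS over positions carrying the prefix built so far (1-branch before 0-branch), then the same valid_cycle filter.
import Mathlib
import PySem

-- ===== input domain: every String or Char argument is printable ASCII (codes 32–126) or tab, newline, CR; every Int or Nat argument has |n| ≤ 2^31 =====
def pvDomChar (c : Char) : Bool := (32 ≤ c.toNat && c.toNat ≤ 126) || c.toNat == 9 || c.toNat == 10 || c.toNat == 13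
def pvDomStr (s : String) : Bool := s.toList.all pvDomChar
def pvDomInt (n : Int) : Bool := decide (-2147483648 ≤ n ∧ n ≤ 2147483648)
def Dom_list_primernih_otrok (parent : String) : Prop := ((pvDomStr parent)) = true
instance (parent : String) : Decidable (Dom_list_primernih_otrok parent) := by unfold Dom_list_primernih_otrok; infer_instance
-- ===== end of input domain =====

-- B replaces A's level-by-level rebuilding (with k/dif bookkeeping) by a recursive DFS over positions; return values proved equal on valid nonempty parents.

-- ===== PORT A =====
-- shared helper: literal port of valid_cycle (early-return loop written as .all over the same range;
-- the defaults of pyGetD are never used: for i in [0, len-2], i-1 (that is, -1 for i = 0), i and i+1 are in range)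
def validCycleChars (cycle : List Char) : Bool :=
  (PySem.List.pyRange 0 ((cycle.length : Int) - 1) 1).all (fun i =>
    if PySem.List.pyGetD cycle i ' ' == '1' then
      (PySem.List.pyGetD cycle (i - 1) ' ' == '0') && (PySem.List.pyGetD cycle (i + 1) ' ' == '0')
    else true)

-- literal port of A; strings are carried as List Char (PySem.Chars convention).
-- pyGetD res j []: j ranges over range(k) with k = len(res) throughout (proved below), so the default is never used.
def list_primernih_otrok (parent : String) : List String :=
  let p := parent.toList
  if validCycleChars p then
    match p with
    | [] => []    -- parent[0] raises IndexError here; excluded by Pre_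
    | c0 :: rest =>
      let init : List (List Char) × Int := if c0 == '1' then ([['0']], 1) else ([['1'], ['0']], 2)
      let st := rest.foldl (fun (st : List (List Char) × Int) (i : Char) =>
        let res := st.1
        let k := st.2
        if i == '1' then
          ((PySem.List.pyRange 0 k 1).foldl
            (fun tren j => tren ++ [PySem.List.pyGetD res j [] ++ ['0']]) [], k)
        else
          let td := (PySem.List.pyRange 0 k 1).foldl (fun (td : List (List Char) × Int) j =>
            let rj := PySem.List.pyGetD res j []
            if PySem.List.pyGetD rj (-1) ' ' == '1' then (td.1 ++ [rj ++ ['0']], td.2 + 1)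
            else (td.1 ++ [rj ++ ['1'], rj ++ ['0']], td.2)) ([], 0)
          (td.1, k * 2 - td.2)) init
      (st.1.foldl (fun tren i => if validCycleChars i then tren ++ [i] else tren) []).map
        (fun l => String.ofList l)
  else []       -- assert fails (AssertionError); excluded by Pre_

-- ===== PORT B =====
-- literal port of B's while loop: an explicit DFS stack of (remaining characters, prefix built so far);
-- the Lean list keeps the stack TOP-FIRST, so Python's append/pop at the right end is cons/head here
-- (the two '0'/'1' pushes appear in reversed order for that reason), and rest[1:] is the tail rs of rest.
def dfsLoop : List (List Char × List Char) → List (List Char) → List (List Char)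
  | [], out => out
  | (rest, pre) :: st, out =>
    match rest with
    | [] => dfsLoop st (out ++ [pre])
    | c :: rs =>
      if c == '1' || (!pre.isEmpty && (PySem.List.pyGetD pre (-1) ' ' == '1')) then
        dfsLoop ((rs, pre ++ ['0']) :: st) out
      else
        dfsLoop ((rs, pre ++ ['1']) :: (rs, pre ++ ['0']) :: st) out
termination_by st _ => (st.map (fun e => 3 ^ e.1.length)).sum
decreasing_by
  all_goals simp [pow_succ]
  all_goals (have := pow_pos (show (0:ℕ) < 3 by omega) rs.length; omega)

def list_primernih_otrok_alt (parent : String) : List String :=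
  if validCycleChars parent.toList then
    ((dfsLoop [(parent.toList, [])] []).filter validCycleChars).map (fun l => String.ofList l)
  else []      -- assert fails

-- ===== PRECONDITION & SPEC =====
-- Pre_ excludes exactly the inputs on which A raises: strings failing the assert (AssertionError)
-- and the empty string, where A passes the assert and then raises IndexError at parent[0].
def Pre_list_primernih_otrok (parent : String) : Prop :=
  validCycleChars parent.toList = true ∧ parent.toList ≠ []
instance (parent : String) : Decidable (Pre_list_primernih_otrok parent) := by
  unfold Pre_list_primernih_otrok; infer_instance
def pvWitness_list_primernih_otrok : String := "010"

def Spec_list_primernih_otrok (parent : String) (out : List String) : Prop :=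
  out = list_primernih_otrok_alt parent
instance (parent : String) (out : List String) : Decidable (Spec_list_primernih_otrok parent out) := by
  unfold Spec_list_primernih_otrok; infer_instance

-- ===== CLAIM (what is proved, stated in full; the proofs are below) =====
def Claim_equal_list_primernih_otrok : Prop := ∀ (parent : String), Dom_list_primernih_otrok parent → Pre_list_primernih_otrok parent → Spec_list_primernih_otrok parent (list_primernih_otrok parent)

-- ===== LEMMAS AND PROOFS =====

-- proof-side recursive form of B's DFS (one stack entry expanded fully)
def dfsOtrok : List Char → List Char → List (List Char)
  | [], pre => [pre]
  | c :: rest, pre =>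
    if c == '1' || (!pre.isEmpty && (PySem.List.pyGetD pre (-1) ' ' == '1')) then
      dfsOtrok rest (pre ++ ['0'])
    else
      dfsOtrok rest (pre ++ ['1']) ++ dfsOtrok rest (pre ++ ['0'])

-- B's stack loop collects, in order, the leaves of each stack entry's DFS tree
lemma dfsLoop_eq : ∀ (st : List (List Char × List Char)) (out : List (List Char)),
    dfsLoop st out = out ++ st.flatMap (fun e => dfsOtrok e.1 e.2) := by
  intro st out
  induction st, out using dfsLoop.induct with
  | case1 out => simp [dfsLoop]
  | case2 pre st out ih =>
    rw [dfsLoop, ih]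
    simp [dfsOtrok]
  | case3 pre st out c rs h ih =>
    rw [dfsLoop, if_pos h, ih]
    conv_rhs => rw [List.flatMap_cons]
    rw [dfsOtrok, if_pos h]
    simp
  | case4 pre st out c rs h ih =>
    rw [dfsLoop, if_neg h, ih]
    conv_rhs => rw [List.flatMap_cons]
    rw [dfsOtrok, if_neg h]
    simp

-- the set of children of a prefix at a position whose parent character is c
def childO (pre : List Char) (c : Char) : List (List Char) :=
  if c == '1' || (!pre.isEmpty && (PySem.List.pyGetD pre (-1) ' ' == '1')) then [pre ++ ['0']]
  else [pre ++ ['1'], pre ++ ['0']]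

-- A's condition for one child agrees with childO's: pyGetD [] (-1) ' ' = ' ' != '1' covers the empty prefix
lemma cond_agree (rj : List Char) :
    (PySem.List.pyGetD rj (-1) ' ' == '1')
      = (!rj.isEmpty && (PySem.List.pyGetD rj (-1) ' ' == '1')) := by
  cases rj with
  | nil => simp [PySem.List.pyGetD, PySem.List.pyGet?]
  | cons x xs => simp

lemma childO_one {c : Char} (hc : (c == '1') = true) (pre : List Char) :
    childO pre c = [pre ++ ['0']] := by
  unfold childO; simp [hc]

lemma childO_ne {c : Char} (hc : (c == '1') = false) (pre : List Char) :
    childO pre c = if PySem.List.pyGetD pre (-1) ' ' == '1' then [pre ++ ['0']]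
                   else [pre ++ ['1'], pre ++ ['0']] := by
  unfold childO
  rw [← cond_agree]
  simp [hc]

lemma dfsOtrok_cons (c : Char) (rest pre : List Char) :
    dfsOtrok (c :: rest) pre = (childO pre c).flatMap (fun q => dfsOtrok rest q) := by
  unfold childO
  by_cases h : (c == '1' || (!pre.isEmpty && (PySem.List.pyGetD pre (-1) ' ' == '1'))) = true
  · rw [if_pos h]
    conv_lhs => rw [dfsOtrok]
    rw [if_pos h]
    simp
  · rw [if_neg h]
    conv_lhs => rw [dfsOtrok]
    rw [if_neg h]
    simp

lemma dfsOtrok_flat (l : List Char) : ∀ res : List (List Char),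
    res.flatMap (fun pre => dfsOtrok l pre)
      = l.foldl (fun r c => r.flatMap (fun pre => childO pre c)) res := by
  induction l with
  | nil => intro res; simp [dfsOtrok]
  | cons c rest ih =>
    intro res
    simp only [List.foldl_cons]
    rw [← ih]
    simp only [dfsOtrok_cons, ← List.flatMap_assoc]

-- A's '0'-branch inner loop, folded over res: first component is the flatMap of children,
-- second (dif) keeps d + 2*len(res) - len(result)
lemma zero_branch {c : Char} (hc : (c == '1') = false) : ∀ (res acc : List (List Char)) (d : Int),
    res.foldl (fun (td : List (List Char) × Int) rj =>
        if PySem.List.pyGetD rj (-1) ' ' == '1' then (td.1 ++ [rj ++ ['0']], td.2 + 1)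
        else (td.1 ++ [rj ++ ['1'], rj ++ ['0']], td.2)) (acc, d)
      = (acc ++ res.flatMap (fun pre => childO pre c),
         d + 2 * (res.length : Int) - ((res.flatMap (fun pre => childO pre c)).length : Int)) := by
  intro res
  induction res with
  | nil => intro acc d; simp
  | cons rj rest ih =>
    intro acc d
    simp only [List.foldl_cons, List.flatMap_cons]
    by_cases h : (PySem.List.pyGetD rj (-1) ' ' == '1') = true
    · rw [if_pos h, ih, childO_ne hc, if_pos h]
      simp only [Prod.mk.injEq, List.append_assoc]
      refine ⟨trivial, ?_⟩
      simp only [List.length_cons, List.length_append, List.length_cons, List.length_nil]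
      push_cast
      ring
    · rw [if_neg h, ih, childO_ne hc, if_neg h]
      simp only [Prod.mk.injEq, List.append_assoc]
      refine ⟨trivial, ?_⟩
      simp only [List.length_cons, List.length_append, List.length_nil]
      push_cast
      ring

-- A's main loop computes the repeated flatMap of childO, with k = len(res) as invariant
lemma main_loop (l : List Char) : ∀ (res : List (List Char)) (k : Int), k = (res.length : Int) →
    l.foldl (fun (st : List (List Char) × Int) (i : Char) =>
        let res := st.1
        let k := st.2
        if i == '1' then
          ((PySem.List.pyRange 0 k 1).foldl
            (fun tren j => tren ++ [PySem.List.pyGetD res j [] ++ ['0']]) [], k)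
        else
          let td := (PySem.List.pyRange 0 k 1).foldl (fun (td : List (List Char) × Int) j =>
            let rj := PySem.List.pyGetD res j []
            if PySem.List.pyGetD rj (-1) ' ' == '1' then (td.1 ++ [rj ++ ['0']], td.2 + 1)
            else (td.1 ++ [rj ++ ['1'], rj ++ ['0']], td.2)) ([], 0)
          (td.1, k * 2 - td.2)) (res, k)
      = (l.foldl (fun r c => r.flatMap (fun pre => childO pre c)) res,
         ((l.foldl (fun r c => r.flatMap (fun pre => childO pre c)) res).length : Int)) := by
  induction l with
  | nil => intro res k hk; simp [hk]
  | cons c rest ih =>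
    intro res k hk
    simp only [List.foldl_cons]
    by_cases hc : (c == '1') = true
    · rw [if_pos hc]
      have h1 : (PySem.List.pyRange 0 k 1).foldl
            (fun tren j => tren ++ [PySem.List.pyGetD res j [] ++ ['0']]) []
          = res.flatMap (fun pre => childO pre c) := by
        rw [hk, PySem.List.foldl_pyRange_zero_pyGetD' res ([] : List Char)
              (fun tren rj => tren ++ [rj ++ ['0']]) []]
        rw [PySem.List.foldl_append_singleton_eq_map]
        simp only [childO_one hc, List.nil_append, ← List.map_eq_flatMap]
      rw [h1]
      have hk2 : k = ((res.flatMap (fun pre => childO pre c)).length : Int) := by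
        rw [hk]
        congr 1
        simp [childO_one hc, ← List.map_eq_flatMap]
      rw [hk2]
      exact ih _ _ rfl
    · rw [Bool.not_eq_true] at hc
      rw [if_neg (by simp [hc])]
      have h0 : (PySem.List.pyRange 0 k 1).foldl (fun (td : List (List Char) × Int) j =>
            let rj := PySem.List.pyGetD res j []
            if PySem.List.pyGetD rj (-1) ' ' == '1' then (td.1 ++ [rj ++ ['0']], td.2 + 1)
            else (td.1 ++ [rj ++ ['1'], rj ++ ['0']], td.2)) ([], 0)
          = (res.flatMap (fun pre => childO pre c),
             2 * (res.length : Int) - ((res.flatMap (fun pre => childO pre c)).length : Int)) := by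
        rw [hk, PySem.List.foldl_pyRange_zero_pyGetD' res ([] : List Char)
              (fun (td : List (List Char) × Int) rj =>
                if PySem.List.pyGetD rj (-1) ' ' == '1' then (td.1 ++ [rj ++ ['0']], td.2 + 1)
                else (td.1 ++ [rj ++ ['1'], rj ++ ['0']], td.2)) (([], 0) : List (List Char) × Int)]
        rw [zero_branch hc res [] 0]
        simp only [List.nil_append, zero_add]
      rw [h0]
      have harith : k * 2 - (2 * (res.length : Int) - ((res.flatMap (fun pre => childO pre c)).length : Int))
          = ((res.flatMap (fun pre => childO pre c)).length : Int) := by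
        rw [hk]; ring
      rw [harith]
      exact ih _ _ rfl

-- ===== VERDICT =====
theorem list_primernih_otrok_spec : Claim_equal_list_primernih_otrok := by
  intro parent _ hpre
  obtain ⟨hvalid, hne⟩ := hpre
  unfold Spec_list_primernih_otrok list_primernih_otrok list_primernih_otrok_alt
  rw [if_pos hvalid, if_pos hvalid]
  match hp : parent.toList with
  | [] => exact absurd hp hne
  | c0 :: rest =>
    simp only []
    have hinit : (if c0 == '1' then (([['0']], 1) : List (List Char) × Int) else ([['1'], ['0']], 2))
        = (childO ([] : List Char) c0, ((childO ([] : List Char) c0).length : Int)) := by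
      unfold childO
      by_cases hc : (c0 == '1') = true
      · rw [if_pos hc, if_pos (by simp [hc])]
        simp
      · rw [if_neg hc, if_neg (by simp [hc])]
        simp
    rw [hinit, main_loop rest (childO ([] : List Char) c0) _ rfl]
    have hb : dfsLoop [(c0 :: rest, [])] [] =
        rest.foldl (fun r c => r.flatMap (fun pre => childO pre c)) (childO ([] : List Char) c0) := by
      rw [dfsLoop_eq]
      simp only [List.flatMap_cons, List.flatMap_nil, List.append_nil, List.nil_append]
      have h := dfsOtrok_flat (c0 :: rest) [[]]
      simp only [List.flatMap_cons, List.flatMap_nil, List.append_nil] at h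
      rw [h, List.foldl_cons]
      simp
    rw [hb]
    rw [show (fun (tren : List (List Char)) (i : List Char) =>
          if validCycleChars i then tren ++ [i] else tren)
        = (fun tren i => if validCycleChars i then tren ++ [id i] else tren) by rfl]
    rw [PySem.List.foldl_append_if validCycleChars id]
    simp [List.map_id]
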